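-- pv_equiv track=rewrite | github.com/jonathansnolan/Codewars | 7 kyu/codewars_simple_string_reversal.py | solve
-- ===== SOURCE A (Python) =====
-- def solve(s):
--     x = []
--     for k in list(range(0,len(s))):
--         if s[k] == " ":
--             x.append(k)
--
--     y = s.split()
--     y = y[::-1]
--
--     z = []
--     for k in y:
--         z.append(k[::-1])
--
--     y = []
--     for k in z:
--         y+=(list(k))
--
--
--     for k in x:
--         y.insert(k, " ")
--
--     j = ""
--     for k in y:
--         j += k
--
--
--
--
--     return j
-- ===== SOURCE B (Python) =====
-- def solve(s):
--     # Reverse the non-space characters, keeping each ' ' at its original position.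
--     rev = [c for c in s if c != ' ']
--     rev.reverse()
--     it = iter(rev)
--     return ''.join(' ' if c == ' ' else next(it) for c in s)
-- ===== Notes on version B (the rewrite author's own statement) =====
-- stated objective: alternative
-- what changed: Replaces the split/reverse-each-word pipeline with repeated list.insert for every space by a single pass that streams the reversed non-space characters into place, emitting a space wherever the original has one.
-- intended difference: On strings containing whitespace other than the space character (tab/newline/CR) A silently deletes those characters (str.split() consumes them but only space positions are re-inserted) and returns a shorter string, while B keeps them as ordinary characters in the reversal, which is the intended length-preserving behaviour. — e.g. on solve("a\tb"): A returns "ba", B returns "b\ta"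
import Mathlib
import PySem

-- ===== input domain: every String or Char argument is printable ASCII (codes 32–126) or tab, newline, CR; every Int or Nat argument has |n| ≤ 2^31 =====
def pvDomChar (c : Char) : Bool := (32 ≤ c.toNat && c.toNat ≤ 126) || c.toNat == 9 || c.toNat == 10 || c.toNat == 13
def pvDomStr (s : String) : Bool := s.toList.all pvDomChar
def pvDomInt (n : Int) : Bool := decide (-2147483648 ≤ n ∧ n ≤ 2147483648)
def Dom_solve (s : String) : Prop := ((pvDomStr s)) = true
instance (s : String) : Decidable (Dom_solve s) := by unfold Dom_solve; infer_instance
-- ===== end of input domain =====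

-- B replaces A's split / reverse-each-word / repeated list.insert pipeline by one linear pass
-- that streams the reversed non-space characters into place.

-- ===== PORT A =====
def solve (s : String) : String :=
  let cs := s.toList
  -- x = []; for k in range(0, len(s)): if s[k] == " ": x.append(k)
  -- (s[k] is always in range here, so pyGetD with an arbitrary default is exact)
  let x : List Int := (PySem.List.pyRange 0 (cs.length : Int)).foldl
      (fun x k => if PySem.List.pyGetD cs k '?' = ' ' then x ++ [k] else x) []
  -- y = s.split(); y = y[::-1]
  let y : List (List Char) := PySem.Chars.split₀ cs
  let y : List (List Char) := (PySem.List.slice? y none none (-1)).getD []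
  -- z = []; for k in y: z.append(k[::-1])
  let z : List (List Char) := y.foldl (fun z k => z ++ [(PySem.List.slice? k none none (-1)).getD []]) []
  -- y = []; for k in z: y += list(k)
  let y2 : List Char := z.foldl (fun y k => y ++ k) []
  -- for k in x: y.insert(k, " ")
  let y3 : List Char := x.foldl (fun y k => PySem.List.insert y k ' ') y2
  -- j = ""; for k in y: j += k
  let j : List Char := y3.foldl (fun j k => j ++ [k]) []
  String.ofList j

-- ===== PORT B =====
-- ''.join(' ' if c == ' ' else next(it) for c in s): walk s once, consuming the reversed
-- non-space characters one by one.  The [] branch of the non-space case mirrors the iterator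
-- being exhausted; it is unreachable because rev holds exactly one character per non-space
-- character of s.
def bMerge : List Char → List Char → List Char
  | [], _ => []
  | c :: cs, rev =>
    if c = ' ' then ' ' :: bMerge cs rev
    else
      match rev with
      | r :: rest => r :: bMerge cs rest
      | [] => bMerge cs []

def solve_alt (s : String) : String :=
  let cs := s.toList
  -- rev = [c for c in s if c != ' ']; rev.reverse()
  let rev : List Char := (cs.filter (fun c => c ≠ ' ')).reverse
  String.ofList (bMerge cs rev)

-- ===== PRECONDITION & SPEC =====
-- On strings containing whitespace other than the space character (tab/newline/CR) A silently
-- deletes those characters (str.split() consumes them but only space positions are re-inserted)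
-- and returns a shorter string, while B keeps them as ordinary characters in the reversal,
-- which is the intended length-preserving behaviour.
def D_solve (s : String) : Prop :=
  (s.toList.any (fun c => c == '\t' || c == '\n' || c == '\r')) = true
instance (s : String) : Decidable (D_solve s) := by unfold D_solve; infer_instance

def Spec_solve (s : String) (out : String) : Prop := ¬ D_solve s → out = solve_alt s
instance (s : String) (out : String) : Decidable (Spec_solve s out) := by unfold Spec_solve; infer_instance

def pvDiffWitness_solve : String := "a\tb"
def pvDiffWitnessOut_solve : String × String := ("ba", "b\ta")

-- ===== CLAIM (what is proved, stated in full; the proofs are below) =====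
def Claim_unchanged_solve : Prop := ∀ (s : String), Dom_solve s → Spec_solve s (solve s)
def Claim_changed_solve : Prop := Dom_solve (pvDiffWitness_solve) ∧ D_solve (pvDiffWitness_solve) ∧ solve (pvDiffWitness_solve) = pvDiffWitnessOut_solve.1 ∧ solve_alt (pvDiffWitness_solve) = pvDiffWitnessOut_solve.2 ∧ pvDiffWitnessOut_solve.1 ≠ pvDiffWitnessOut_solve.2
def Claim_exact_solve : Prop := ∀ (s : String), Dom_solve s → D_solve s → solve s ≠ solve_alt s

-- ===== LEMMAS AND PROOFS =====

-- The indices (as Ints) of the spaces of cs, offset by o.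
def spacesIdx : List Char → Nat → List Int
  | [], _ => []
  | c :: cs, o => if c = ' ' then (o : Int) :: spacesIdx cs (o + 1) else spacesIdx cs (o + 1)

lemma char_eq_of_toNat {c d : Char} (h : c.toNat = d.toNat) : c = d :=
  Char.ext (UInt32.toNat_inj.mp h)

-- A's first loop computes exactly the space indices.
lemma xloop_eq (full : List Char) :
    ∀ (n o : Nat) (acc : List Int), full.length - o = n →
      (PySem.List.pyRange (o : Int) (full.length : Int)).foldl
        (fun x k => if PySem.List.pyGetD full k '?' = ' ' then x ++ [k] else x) acc
      = acc ++ spacesIdx (full.drop o) o := by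
  intro n
  induction n with
  | zero =>
    intro o acc h
    have hle : full.length ≤ o := by omega
    have hr : PySem.List.pyRange (o : Int) (full.length : Int) = [] := by
      simp [PySem.List.pyRange]
      omega
    rw [hr, List.drop_of_length_le hle]
    simp [spacesIdx]
  | succ n ih =>
    intro o acc h
    have hlt : o < full.length := by omega
    have hr := PySem.List.pyRange_one_cons (a := (o : Int)) (b := (full.length : Int)) (by exact_mod_cast hlt)
    rw [hr]
    have hget : PySem.List.pyGetD full (o : Int) '?' = full[o] :=
      PySem.List.pyGetD_eq_getElem full '?' (by positivity) (by exact_mod_cast hlt)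
    have hdrop : full.drop o = full[o] :: full.drop (o + 1) := List.drop_eq_getElem_cons hlt
    simp only [List.foldl_cons, hget]
    have hcast : ((o : Int) + 1) = ((o + 1 : Nat) : Int) := by push_cast; ring
    by_cases hc : full[o] = ' '
    · rw [if_pos hc, hcast, ih (o + 1) (acc ++ [(o : Int)]) (by omega), hdrop]
      simp [spacesIdx, hc]
    · rw [if_neg hc, hcast, ih (o + 1) acc (by omega), hdrop]
      simp [spacesIdx, hc]

-- flatten of split() keeps exactly the non-whitespace characters, in order.
lemma flatten_split₀_go (rest : List Char) :
    ∀ (cur : List Char) (acc : List (List Char)),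
      (PySem.Chars.split₀.go rest cur acc).flatten
        = acc.reverse.flatten ++ cur.reverse ++ rest.filter (fun c => !PySem.Chars.isspace c) := by
  induction rest with
  | nil =>
    intro cur acc
    simp only [PySem.Chars.split₀.go]
    by_cases h : cur = []
    · simp [h]
    · simp [List.isEmpty_iff, h]
  | cons c rest ih =>
    intro cur acc
    simp only [PySem.Chars.split₀.go]
    by_cases hs : PySem.Chars.isspace c = true
    · by_cases h : cur = []
      · simp [hs, h, ih]
      · simp [hs, List.isEmpty_iff, h, ih]
    · simp [hs, ih, List.reverse_cons]

lemma flatten_split₀ (cs : List Char) :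
    (PySem.Chars.split₀ cs).flatten = cs.filter (fun c => !PySem.Chars.isspace c) := by
  simpa using flatten_split₀_go cs [] []

-- Folding list.insert over the (increasing) space indices is exactly B's single merge pass.
lemma insert_fold :
    ∀ (cs : List Char) (P L : List Char), L.length = (cs.filter (fun c => c ≠ ' ')).length →
      (spacesIdx cs P.length).foldl (fun y k => PySem.List.insert y k ' ') (P ++ L)
        = P ++ bMerge cs L := by
  intro cs
  induction cs with
  | nil =>
    intro P L h
    simp only [List.filter_nil, List.length_nil, List.length_eq_zero_iff] at h
    simp [spacesIdx, bMerge, h]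
  | cons c cs ih =>
    intro P L h
    by_cases hc : c = ' '
    · subst hc
      have hsp : spacesIdx (' ' :: cs) P.length = (P.length : Int) :: spacesIdx cs (P.length + 1) := by
        simp [spacesIdx]
      have hins : PySem.List.insert (P ++ L) (P.length : Int) ' ' = (P ++ [' ']) ++ L := by
        rw [PySem.List.insert_natCast _ _ _ (by simp)]
        simp
      rw [hsp, List.foldl_cons, hins]
      have := ih (P ++ [' ']) L (by simpa using h)
      simp only [List.length_append, List.length_cons, List.length_nil] at this
      rw [this]
      simp [bMerge]
    · have hfil : ((c :: cs).filter (fun c => c ≠ ' ')).length = (cs.filter (fun c => c ≠ ' ')).length + 1 := by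
        simp [hc]
      rw [hfil] at h
      match L, h with
      | r :: L', h =>
        have hsp : spacesIdx (c :: cs) P.length = spacesIdx cs (P.length + 1) := by
          simp [spacesIdx, hc]
        rw [hsp]
        have : P ++ r :: L' = (P ++ [r]) ++ L' := by simp
        rw [this]
        have hih := ih (P ++ [r]) L' (by simpa using h)
        simp only [List.length_append, List.length_cons, List.length_nil] at hih
        rw [hih]
        simp [bMerge, hc]

-- In the admitted domain, outside D_, the only whitespace character is ' '.
lemma isspace_char (c : Char) (hdom : pvDomChar c = true)
    (h : ¬(c = '\t' ∨ c = '\n' ∨ c = '\r')) :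
    PySem.Chars.isspace c = decide (c = ' ') := by
  have h9 : c.toNat ≠ 9 := fun hn => h (Or.inl (char_eq_of_toNat hn))
  have h10 : c.toNat ≠ 10 := fun hn => h (Or.inr (Or.inl (char_eq_of_toNat hn)))
  have h13 : c.toNat ≠ 13 := fun hn => h (Or.inr (Or.inr (char_eq_of_toNat hn)))
  have h32 : (c = ' ') ↔ (c.toNat = 32) :=
    ⟨fun hh => by subst hh; rfl, fun hh => char_eq_of_toNat (show c.toNat = ' '.toNat from hh)⟩
  rw [Bool.eq_iff_iff]
  simp only [pvDomChar, Bool.or_eq_true, Bool.and_eq_true, beq_iff_eq, decide_eq_true_eq] at hdom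
  simp only [PySem.Chars.isspace, Bool.or_eq_true, Bool.and_eq_true, decide_eq_true_eq, h32]
  omega

-- The concat loop of A is flatten.
lemma concat_fold (L : List (List Char)) :
    L.foldl (fun y k => y ++ k) ([] : List Char) = L.flatten := by
  have := PySem.List.foldl_append_eq_flatMap (fun k : List Char => k) L []
  simpa [List.flatMap_id] using this

-- Each list.insert grows the list by one.
lemma foldl_insert_len (ks : List Int) :
    ∀ (L : List Char), (ks.foldl (fun y k => PySem.List.insert y k ' ') L).length
      = L.length + ks.length := by
  induction ks with
  | nil => intro L; simp
  | cons k ks ih =>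
    intro L
    simp only [List.foldl_cons, List.length_cons, ih, PySem.List.length_insert]
    omega

lemma spacesIdx_len (cs : List Char) :
    ∀ (o : Nat), (spacesIdx cs o).length = cs.countP (fun c => decide (c = ' ')) := by
  induction cs with
  | nil => intro o; simp [spacesIdx]
  | cons c cs ih =>
    intro o
    by_cases hc : c = ' '
    · simp [spacesIdx, hc, ih]
    · simp [spacesIdx, hc, ih]

-- B's merge pass preserves the length of s.
lemma len_bMerge :
    ∀ (cs L : List Char), L.length = (cs.filter (fun c => c ≠ ' ')).length →
      (bMerge cs L).length = cs.length := by
  intro cs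
  induction cs with
  | nil => intro L h; simp [bMerge]
  | cons c cs ih =>
    intro L h
    by_cases hc : c = ' '
    · subst hc
      have hb : bMerge (' ' :: cs) L = ' ' :: bMerge cs L := by simp [bMerge]
      rw [hb, List.length_cons, ih L (by simpa using h)]
      simp
    · have hfil : ((c :: cs).filter (fun c => c ≠ ' ')).length = (cs.filter (fun c => c ≠ ' ')).length + 1 := by
        simp [hc]
      rw [hfil] at h
      match L, h with
      | r :: L', h =>
        have hb : bMerge (c :: cs) (r :: L') = r :: bMerge cs L' := by simp [bMerge, hc]
        rw [hb, List.length_cons, ih L' (by simpa using h)]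
        simp

lemma countP_lt_of_witness {α : Type} (l : List α) (p q : α → Bool)
    (hpq : ∀ c ∈ l, p c = true → q c = true)
    (x : α) (hx : x ∈ l) (hq : q x = true) (hp : p x = false) :
    l.countP p < l.countP q := by
  obtain ⟨l1, l2, rfl⟩ := List.append_of_mem hx
  have h1 : l1.countP p ≤ l1.countP q :=
    List.countP_mono_left (fun c hc => hpq c (by simp [hc]))
  have h2 : l2.countP p ≤ l2.countP q :=
    List.countP_mono_left (fun c hc => hpq c (by simp [hc]))
  simp [List.countP_append, hp, hq]
  omega

-- The length of A's result: one character per non-whitespace character plus one per ' '.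
lemma solve_len (s : String) :
    (solve s).toList.length
      = (s.toList.filter (fun c => !PySem.Chars.isspace c)).length
        + s.toList.countP (fun c => decide (c = ' ')) := by
  unfold solve
  simp only []
  have hx := xloop_eq s.toList s.toList.length 0 [] (by simp)
  simp only [Nat.cast_zero, List.drop_zero, List.nil_append] at hx
  rw [hx, PySem.List.slice?_none_none_neg_one]
  simp only [Option.getD_some]
  have hz : (fun (z : List (List Char)) (k : List Char) => z ++ [(PySem.List.slice? k none none (-1)).getD []])
      = fun z k => z ++ [k.reverse] := by
    funext z k; rw [PySem.List.slice?_none_none_neg_one]; rfl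
  rw [hz]
  rw [PySem.List.foldl_append_singleton_eq_map (fun k : Char => k)]
  simp only [List.map_id', List.nil_append]
  rw [PySem.List.foldl_append_singleton_eq_map List.reverse, List.nil_append]
  rw [concat_fold, String.toList_ofList, foldl_insert_len, spacesIdx_len]
  rw [List.map_reverse, ← List.reverse_flatten, flatten_split₀]
  simp

-- ===== VERDICT =====
theorem solve_spec : Claim_unchanged_solve := by
  intro s hdom hnd
  show solve s = solve_alt s
  unfold solve solve_alt
  simp only []
  have hx := xloop_eq s.toList s.toList.length 0 [] (by simp)
  simp only [Nat.cast_zero, List.drop_zero, List.nil_append] at hx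
  rw [hx, PySem.List.slice?_none_none_neg_one]
  simp only [Option.getD_some]
  have hz : (fun (z : List (List Char)) (k : List Char) => z ++ [(PySem.List.slice? k none none (-1)).getD []])
      = fun z k => z ++ [k.reverse] := by
    funext z k; rw [PySem.List.slice?_none_none_neg_one]; rfl
  rw [hz]
  -- the j loop is the outermost fold of the same append-singleton shape, rewrite it first
  rw [PySem.List.foldl_append_singleton_eq_map (fun k : Char => k)]
  simp only [List.map_id', List.nil_append]
  rw [PySem.List.foldl_append_singleton_eq_map List.reverse, List.nil_append]
  rw [concat_fold]
  -- reversed word list, each word reversed and concatenated = reversed non-whitespace chars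
  have hcore : ((PySem.Chars.split₀ s.toList).reverse.map List.reverse).flatten
      = (s.toList.filter (fun c => c ≠ ' ')).reverse := by
    rw [List.map_reverse, ← List.reverse_flatten, flatten_split₀]
    congr 1
    apply List.filter_congr
    intro c hc
    have hdc : pvDomChar c = true := by
      simp only [Dom_solve, pvDomStr, List.all_eq_true] at hdom
      exact hdom c hc
    have hnc : ¬(c = '\t' ∨ c = '\n' ∨ c = '\r') := by
      intro hcc
      apply hnd
      show _ = true
      rw [List.any_eq_true]
      exact ⟨c, hc, by rcases hcc with h | h | h <;> simp [h]⟩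
    rw [isspace_char c hdc hnc]
    simp
  rw [hcore]
  have hins := insert_fold s.toList [] ((s.toList.filter (fun c => c ≠ ' ')).reverse) (by simp)
  simp only [List.length_nil, List.nil_append] at hins
  rw [hins]

theorem solve_changed : Claim_changed_solve := by
  unfold Claim_changed_solve
  refine ⟨by decide, by decide, ?_, ?_, by decide⟩
  · show solve "a\tb" = "ba"
    decide
  · show solve_alt "a\tb" = "b\ta"
    decide

theorem solve_tight : Claim_exact_solve := by
  intro s _hdom hd heq
  rw [D_solve, List.any_eq_true] at hd
  obtain ⟨c0, hc0, hb⟩ := hd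
  have hcc : c0 = '\t' ∨ c0 = '\n' ∨ c0 = '\r' := by
    simpa [or_assoc] using hb
  have hlenA := solve_len s
  have hlenB : (solve_alt s).toList.length = s.toList.length := by
    unfold solve_alt
    simp only [String.toList_ofList]
    exact len_bMerge s.toList _ (by simp)
  have hsp : PySem.Chars.isspace c0 = true := by
    rcases hcc with h | h | h <;> subst h <;> decide
  have hnsp : decide (c0 = ' ') = false := by
    rcases hcc with h | h | h <;> subst h <;> decide
  have hlt : s.toList.countP (fun c => decide (c = ' ')) < s.toList.countP PySem.Chars.isspace :=
    countP_lt_of_witness s.toList _ _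
      (fun c _ hc => by
        have hce : c = ' ' := of_decide_eq_true hc
        subst hce; decide)
      c0 hc0 hsp hnsp
  have hfil : (s.toList.filter (fun c => !PySem.Chars.isspace c)).length
      = s.toList.countP (fun c => !PySem.Chars.isspace c) :=
    List.countP_eq_length_filter.symm
  have hsplit : s.toList.length
      = s.toList.countP PySem.Chars.isspace
        + s.toList.countP (fun c => !PySem.Chars.isspace c) := by
    simpa using List.length_eq_countP_add_countP (p := PySem.Chars.isspace) (l := s.toList)
  rw [hfil] at hlenA
  rw [heq, hlenB] at hlenA
  omega
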